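-- pv_equiv track=rewrite | github.com/azure1016/MyLeetcodePython | Google_OA/oddEvenJump.py | logSetup
-- ===== SOURCE A (Python) =====
-- def logSetup(jumps):
--     next_higher, next_lower = [0] * len(jumps), [0] * len(jumps)
--     monotone_stack = []
--     for _, i in sorted((a, i) for i, a in enumerate(jumps)):
--         while monotone_stack and monotone_stack[-1] < i:
--             next_higher[monotone_stack.pop()] = i
--         monotone_stack.append(i)
--
--     monotone_stack = []
--     for _, i in sorted((-a, i) for i, a in enumerate(jumps)):
--         while monotone_stack and monotone_stack[-1] < i:
--             next_lower[monotone_stack.pop()] = i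
--         monotone_stack.append(i)
--     return next_higher, next_lower
-- ===== SOURCE B (Python) =====
-- def logSetup(jumps):
--     n = len(jumps)
--
--     def best(i, ok, better):
--         b = -1
--         for j in range(i + 1, n):
--             if ok(jumps[j]) and (b == -1 or better(jumps[j], jumps[b])):
--                 b = j
--         return b if b != -1 else 0
--
--     next_higher = [best(i, lambda v: v >= jumps[i], lambda x, y: x < y) for i in range(n)]
--     next_lower = [best(i, lambda v: v <= jumps[i], lambda x, y: x > y) for i in range(n)]
--     return next_higher, next_lower
-- ===== Notes on version B (the rewrite author's own statement) =====
-- stated objective: alternative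
-- what changed: A builds each jump table by sorting (value, index) pairs and sweeping them through a monotone index stack; B drops the sort and the stack entirely and, for each index i, directly scans the later indices keeping the candidate with the best value (first one on ties).
import Mathlib
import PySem

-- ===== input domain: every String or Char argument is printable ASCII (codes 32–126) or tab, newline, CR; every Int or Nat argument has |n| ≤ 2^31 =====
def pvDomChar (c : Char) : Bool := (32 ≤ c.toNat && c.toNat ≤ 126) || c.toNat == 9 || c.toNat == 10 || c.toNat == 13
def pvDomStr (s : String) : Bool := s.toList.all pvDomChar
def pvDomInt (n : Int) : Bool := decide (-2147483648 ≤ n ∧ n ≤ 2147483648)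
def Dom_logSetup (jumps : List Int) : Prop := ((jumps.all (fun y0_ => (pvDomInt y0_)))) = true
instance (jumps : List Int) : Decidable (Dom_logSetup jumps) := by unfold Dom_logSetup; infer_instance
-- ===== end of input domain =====

-- B replaces A's two sort+monotone-stack passes by, for each index, a direct scan of the
-- later indices keeping the best candidate (objective: alternative, same-result different algorithm).

-- ===== PORT A =====
-- the inner `while monotone_stack and monotone_stack[-1] < i:` loop; the stack's top is the
-- head of the Lean list; `next_higher[stack.pop()] = i` is List.set (indices from enumerate
-- are ≥ 0, so .toNat is exact here)
def pvPop (arr : List Int) (stack : List Int) (i : Int) : List Int × List Int :=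
  match stack with
  | [] => (arr, [])
  | t :: rest => if t < i then pvPop (arr.set t.toNat i) rest i else (arr, t :: rest)

-- one iteration of `for _, i in sorted(...)`: pop-and-assign, then append i
def pvStep (st : List Int × List Int) (i : Int) : List Int × List Int :=
  (pvPop st.1 st.2 i).1 |> fun arr => (arr, i :: (pvPop st.1 st.2 i).2)

-- Python sorts the (value, index) tuples lexicographically: key `toLex` on Int × Int is
-- exactly that comparison.
def logSetup (jumps : List Int) : List Int × List Int :=
  let n := jumps.length
  let run := fun (pairs : List (Int × Int)) =>
    (pairs.foldl (fun st p => pvStep st p.2) (List.replicate n (0 : Int), ([] : List Int))).1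
  let nh := run (PySem.List.sorted
      ((PySem.List.enumerate jumps).map (fun p => (p.2, p.1))) (fun p => toLex p))
  let nl := run (PySem.List.sorted
      ((PySem.List.enumerate jumps).map (fun p => (-p.2, p.1))) (fun p => toLex p))
  (nh, nl)

-- ===== PORT B =====
-- Source B: for each i scan j in range(i+1, n) keeping the best candidate index (sentinel -1);
-- jumps[j] with 0 ≤ j < n is PySem.List.pyGetD (exact in range); the `b == -1 or …`
-- short-circuit makes the second disjunct irrelevant when b = -1, as in Python.
def logSetup_alt (jumps : List Int) : List Int × List Int :=
  let n := jumps.length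
  let best := fun (i : Int) (ok : Int → Bool) (better : Int → Int → Bool) =>
    let b := (PySem.List.pyRange (i + 1) n 1).foldl
      (fun b j =>
        if ok (PySem.List.pyGetD jumps j 0) &&
            (b == -1 || better (PySem.List.pyGetD jumps j 0) (PySem.List.pyGetD jumps b 0))
        then j else b) (-1)
    if b != -1 then b else 0
  let nh := (PySem.List.pyRange 0 n 1).map (fun i =>
    best i (fun v => decide (PySem.List.pyGetD jumps i 0 ≤ v)) (fun x y => decide (x < y)))
  let nl := (PySem.List.pyRange 0 n 1).map (fun i =>
    best i (fun v => decide (v ≤ PySem.List.pyGetD jumps i 0)) (fun x y => decide (y < x)))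
  (nh, nl)

-- ===== PRECONDITION & SPEC =====
def Spec_logSetup (jumps : List Int) (out : List Int × List Int) : Prop := out = logSetup_alt jumps
instance (jumps : List Int) (out : List Int × List Int) : Decidable (Spec_logSetup jumps out) := by
  unfold Spec_logSetup; infer_instance

-- ===== CLAIM (what is proved, stated in full; the proofs are below) =====
def Claim_equal_logSetup : Prop := ∀ (jumps : List Int), Dom_logSetup jumps → Spec_logSetup jumps (logSetup jumps)

-- ===== LEMMAS AND PROOFS =====

-- the lexicographic "processed later by A's sorted loop" order on indices, for value map g
def pvLex (g : Int → Int) (a b : Int) : Prop := g a < g b ∨ (g a = g b ∧ a < b)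

-- A's whole stack pass, over the list of indices in sorted order
def pvPass (s : List Int) (st : List Int × List Int) : List Int × List Int :=
  s.foldl pvStep st

-- value A's pass writes at k: first index after k's occurrence in s that is greater than k
def pvF (s : List Int) (k : Int) : Option Int :=
  ((s.dropWhile (fun x => !decide (x = k))).tail).find? (fun x => decide (k < x))

-- B's inner scan, specialised to the value map g
def pvBest (g : Int → Int) (n : Nat) (i : Int) : Int :=
  let b := (PySem.List.pyRange (i + 1) n 1).foldl
    (fun b j => if decide (g i ≤ g j) && (b == -1 || decide (g j < g b)) then j else b) (-1)
  if b != -1 then b else 0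

lemma pvLex_trans {g : Int → Int} {a b c : Int} (h1 : pvLex g a b) (h2 : pvLex g b c) : pvLex g a c := by
  rcases h1 with h1 | ⟨e1, l1⟩ <;> rcases h2 with h2 | ⟨e2, l2⟩ <;>
    simp only [pvLex] <;> omega

lemma pvLex_asymm {g : Int → Int} {a b : Int} (h1 : pvLex g a b) (h2 : pvLex g b a) : False := by
  rcases h1 with h1 | ⟨e1, l1⟩ <;> rcases h2 with h2 | ⟨e2, l2⟩ <;> omega

lemma pvPop_char (i : Int) (stack : List Int) : ∀ (arr : List Int),
    stack.Pairwise (· < ·) →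
    (∀ x ∈ stack, 0 ≤ x ∧ x.toNat < arr.length) →
    (pvPop arr stack i).2 = stack.dropWhile (fun x => decide (x < i)) ∧
    (pvPop arr stack i).1.length = arr.length ∧
    ∀ k : Nat, (pvPop arr stack i).1[k]? =
      if (k : Int) ∈ stack ∧ (k : Int) < i then some i else arr[k]? := by
  induction stack with
  | nil => intro arr _ _; simp [pvPop]
  | cons t rest ih =>
    intro arr hpw hb
    have ht := hb t (by simp)
    by_cases hti : t < i
    · have hrest := ih (arr.set t.toNat i)
        (hpw.sublist (List.sublist_cons_self t rest))
        (by intro x hx; simpa using hb x (by simp [hx]))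
      obtain ⟨h1, h2, h3⟩ := hrest
      refine ⟨?_, ?_, ?_⟩
      · simpa [pvPop, hti] using h1
      · simpa [pvPop, hti] using h2
      · intro k
        have e1 : pvPop arr (t :: rest) i = pvPop (arr.set t.toNat i) rest i := by
          simp [pvPop, hti]
        rw [e1, h3 k]
        by_cases hkr : (k : Int) ∈ rest
        · have hkt : t < (k : Int) := (List.pairwise_cons.mp hpw).1 _ hkr
          by_cases hki : (k : Int) < i
          · simp [hkr, hki]
          · have c1 : ¬ ((k : Int) ∈ rest ∧ (k : Int) < i) := by simp [hki]
            have c2 : ¬ ((k : Int) ∈ t :: rest ∧ (k : Int) < i) := by simp [hki]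
            simp only [c1, c2, if_false]
            exact List.getElem?_set_ne (by omega)
        · by_cases hkt : (k : Int) = t
          · have c1 : ¬ ((k : Int) ∈ rest ∧ (k : Int) < i) := by simp [hkr]
            have c2 : ((k : Int) ∈ t :: rest ∧ (k : Int) < i) := by
              constructor
              · simp [hkt]
              · omega
            rw [if_neg c1, if_pos c2]
            have hkn : k = t.toNat := by omega
            rw [hkn]
            exact List.getElem?_set_self ht.2
          · have c1 : ¬ ((k : Int) ∈ rest ∧ (k : Int) < i) := by simp [hkr]
            have c2 : ¬ ((k : Int) ∈ t :: rest ∧ (k : Int) < i) := by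
              simp [hkr, hkt]
            simp only [c1, c2, if_false]
            exact List.getElem?_set_ne (by omega)
    · refine ⟨by simp [pvPop, hti], by simp [pvPop, hti], ?_⟩
      intro k
      simp only [pvPop, hti]
      have : ¬ ((k : Int) ∈ t :: rest ∧ (k : Int) < i) := by
        rintro ⟨hm, hki⟩
        rcases List.mem_cons.mp hm with h | h
        · omega
        · have := (List.pairwise_cons.mp hpw).1 _ h; omega
      rw [if_neg this]
      simp

lemma pvDropWhile_asc (i : Int) (l : List Int) (hl : l.Pairwise (· < ·)) :
    l.dropWhile (fun x => decide (x < i)) = l.filter (fun x => decide (i ≤ x)) := by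
  induction hl with
  | nil => rfl
  | @cons a l hal hl' ihs =>
    by_cases hai : a < i
    · simp only [List.dropWhile_cons, List.filter_cons, hai, decide_true,
        show ¬ (i ≤ a) by omega, decide_false, Bool.false_eq_true, if_false]
      exact ihs
    · simp only [List.dropWhile_cons, List.filter_cons, hai, decide_false,
        show i ≤ a by omega, decide_true, Bool.false_eq_true, if_false, if_true]
      rw [List.filter_eq_self.mpr]
      intro x hx
      have := hal x hx
      simp; omega

lemma pvPass_char (s : List Int) : ∀ (arr stack : List Int),
    stack.Pairwise (· < ·) →
    (∀ x ∈ stack, x ∉ s) →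
    s.Nodup →
    (∀ x ∈ stack, 0 ≤ x ∧ x.toNat < arr.length) →
    (∀ x ∈ s, 0 ≤ x ∧ x.toNat < arr.length) →
    (pvPass s (arr, stack)).1.length = arr.length ∧
    ∀ k : Nat, k < arr.length → (pvPass s (arr, stack)).1[k]? =
      if (k : Int) ∈ stack then some ((s.find? (fun x => decide ((k : Int) < x))).getD (arr.getD k 0))
      else if (k : Int) ∈ s then some ((pvF s k).getD (arr.getD k 0))
      else arr[k]? := by
  induction s with
  | nil =>
    intro arr stack _ _ _ _ _
    refine ⟨rfl, ?_⟩
    intro k hk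
    simp only [pvPass, List.foldl_nil, List.find?_nil, pvF, List.not_mem_nil]
    have : arr[k]? = some (arr.getD k 0) := by
      rw [List.getD_eq_getElem?_getD, List.getElem?_eq_getElem hk]
      rfl
    split_ifs <;> simp_all
  | cons i s' ih =>
    intro arr stack hpw hdisj hnd hbs hbl
    have hine : ∀ x ∈ stack, x ≠ i := by
      intro x hx h; exact hdisj x hx (h ▸ List.mem_cons_self)
    obtain ⟨hp2, hp1len, hp1⟩ := pvPop_char i stack arr hpw hbs
    set arr' := (pvPop arr stack i).1 with harr'
    set st' := (pvPop arr stack i).2 with hst'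
    have hstep : pvPass (i :: s') (arr, stack) = pvPass s' (arr', i :: st') := by
      simp only [pvPass, List.foldl_cons, pvStep]
      rw [← harr', ← hst']
    have hdw : st' = stack.filter (fun x => decide (i ≤ x)) := by
      rw [hp2]; exact pvDropWhile_asc i stack hpw
    have hstm : ∀ x, x ∈ st' ↔ (x ∈ stack ∧ i ≤ x) := by
      intro x; rw [hdw]; simp
    -- hypotheses for the IH
    have h1 : (i :: st').Pairwise (· < ·) := by
      rw [List.pairwise_cons]
      constructor
      · intro x hx
        rcases (hstm x).mp hx with ⟨hxs, hix⟩
        have := hine x hxs; omega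
      · rw [hdw]; exact hpw.filter _
    have h2 : ∀ x ∈ (i :: st'), x ∉ s' := by
      intro x hx
      rcases List.mem_cons.mp hx with h | h
      · subst h; exact (List.nodup_cons.mp hnd).1
      · exact fun hc => hdisj x ((hstm x).mp h).1 (List.mem_cons_of_mem _ hc)
    have h3 : s'.Nodup := (List.nodup_cons.mp hnd).2
    have h4 : ∀ x ∈ (i :: st'), 0 ≤ x ∧ x.toNat < arr'.length := by
      intro x hx
      rw [hp1len]
      rcases List.mem_cons.mp hx with h | h
      · subst h; exact hbl x List.mem_cons_self
      · exact hbs x ((hstm x).mp h).1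
    have h5 : ∀ x ∈ s', 0 ≤ x ∧ x.toNat < arr'.length := by
      intro x hx; rw [hp1len]; exact hbl x (List.mem_cons_of_mem _ hx)
    obtain ⟨ihlen, ihk⟩ := ih arr' (i :: st') h1 h2 h3 h4 h5
    rw [hstep]
    refine ⟨by rw [ihlen, hp1len], ?_⟩
    intro k hk
    have hk' : k < arr'.length := by rw [hp1len]; exact hk
    have harrk : arr'[k]? = if (k : Int) ∈ stack ∧ (k : Int) < i then some i else arr[k]? := hp1 k
    have harrkD : (k : Int) ∈ stack → ¬ ((k : Int) < i) → arr'.getD k 0 = arr.getD k 0 := by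
      intro _ h2'
      rw [List.getD_eq_getElem?_getD, List.getD_eq_getElem?_getD, harrk, if_neg (by tauto)]
    have harrkN : (k : Int) ∉ stack → arr'.getD k 0 = arr.getD k 0 := by
      intro h1'
      rw [List.getD_eq_getElem?_getD, List.getD_eq_getElem?_getD, harrk, if_neg (by tauto)]
    rw [ihk k hk']
    by_cases hki : (k : Int) = i
    · -- k is the newly pushed element
      have hks : (k : Int) ∉ stack := fun h => hine _ h hki
      have hks' : (k : Int) ∉ s' := hki ▸ (List.nodup_cons.mp hnd).1
      have : (k : Int) ∈ i :: st' := by simp [hki]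
      rw [if_pos this, if_neg hks, if_pos (show ((k:Nat):Int) ∈ i :: s' by simp [hki])]
      have hpvF : pvF (i :: s') k = s'.find? (fun x => decide ((k:Int) < x)) := by
        simp only [pvF, List.dropWhile_cons, hki, decide_true, Bool.not_true,
          Bool.false_eq_true, if_false, List.tail_cons]
      rw [hpvF, harrkN hks]
    · by_cases hkst : (k : Int) ∈ stack
      · rw [if_neg (fun h => hdisj _ hkst h), if_pos hkst]
        by_cases hklt : (k : Int) < i
        · -- k was popped and assigned i
          have : (k : Int) ∉ i :: st' := by
            intro h
            rcases List.mem_cons.mp h with h | h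
            · exact hki h
            · have := ((hstm _).mp h).2; omega
          rw [if_neg this, if_neg (fun h => hdisj _ hkst (List.mem_cons_of_mem _ h))]
          rw [harrk, if_pos ⟨hkst, hklt⟩, List.find?_cons_of_pos (by simpa using hklt)]
          rfl
        · -- k stays on the stack
          have : (k : Int) ∈ i :: st' := by
            right; exact (hstm _).mpr ⟨hkst, by omega⟩
          rw [if_pos this, List.find?_cons_of_neg (by simpa using hklt), harrkD hkst hklt]
      · -- k not on the stack
        have hnotst' : (k : Int) ∉ i :: st' := by
          intro h
          rcases List.mem_cons.mp h with h | h
          · exact hki h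
          · exact hkst ((hstm _).mp h).1
        rw [if_neg hnotst', if_neg hkst]
        by_cases hks' : (k : Int) ∈ s'
        · rw [if_pos hks', if_pos (List.mem_cons_of_mem _ hks')]
          have hpvF : pvF (i :: s') k = pvF s' k := by
            have hne : (!decide (i = (k : Int))) = true := by
              simp only [Bool.not_eq_true', decide_eq_false_iff_not]
              exact fun h => hki h.symm
            simp only [pvF, List.dropWhile_cons, hne, if_true]
          rw [hpvF, harrkN hkst]
        · rw [if_neg hks', if_neg (by simp [hki, hks']), harrk, if_neg (by tauto)]

lemma pvFold_pick (g : Int → Int) (M : List Int) : ∀ (b : Int),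
    M.Pairwise (· < ·) → 0 ≤ b → (∀ j ∈ M, b < j) →
    (M.foldl (fun b j => if b == -1 || decide (g j < g b) then j else b) b) ∈ b :: M ∧
    ∀ x ∈ b :: M, x ≠ (M.foldl (fun b j => if b == -1 || decide (g j < g b) then j else b) b) →
      pvLex g (M.foldl (fun b j => if b == -1 || decide (g j < g b) then j else b) b) x := by
  induction M with
  | nil =>
    intro b _ _ _
    refine ⟨List.mem_cons_self, ?_⟩
    intro x hx hne
    rcases List.mem_cons.mp hx with h | h
    · exact absurd h (by simpa using hne)
    · cases h
  | cons j M' ih =>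
    intro b hpw hb0 hblt
    have hbj : b < j := hblt j List.mem_cons_self
    have hb1 : (b == -1) = false := by simp; omega
    rcases List.pairwise_cons.mp hpw with ⟨hjM, hpw'⟩
    have hstep : List.foldl (fun b j => if b == -1 || decide (g j < g b) then j else b) b (j :: M')
        = List.foldl (fun b j => if b == -1 || decide (g j < g b) then j else b)
            (if decide (g j < g b) then j else b) M' := by
      simp only [List.foldl_cons, hb1, Bool.false_or]
    rw [hstep]
    by_cases hlt : g j < g b
    · simp only [hlt, decide_true, if_true]
      obtain ⟨hmem, hmin⟩ := ih j hpw' (by omega) hjM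
      refine ⟨List.mem_cons_of_mem _ hmem, ?_⟩
      intro x hx hne
      rcases List.mem_cons.mp hx with h | h
      · subst h
        have hrb : pvLex g j x := Or.inl hlt
        by_cases hrj : List.foldl (fun b j => if b == -1 || decide (g j < g b) then j else b) j M' = j
        · rw [hrj]; exact hrb
        · exact pvLex_trans (hmin j List.mem_cons_self (fun h => hrj h.symm)) hrb
      · exact hmin x h hne
    · simp only [hlt, decide_false, if_false, Bool.false_eq_true]
      obtain ⟨hmem, hmin⟩ := ih b hpw' hb0 (fun x hx => lt_trans hbj (hjM x hx))
      refine ⟨?_, ?_⟩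
      · rcases List.mem_cons.mp hmem with h | h
        · rw [h]; exact List.mem_cons_self
        · exact List.mem_cons_of_mem _ (List.mem_cons_of_mem _ h)
      · intro x hx hne
        rcases List.mem_cons.mp hx with h | h
        · exact hmin x (h ▸ List.mem_cons_self) hne
        · rcases List.mem_cons.mp h with h' | h'
          · subst h'
            have hbx : pvLex g b x := by
              rcases lt_or_eq_of_le (le_of_not_gt hlt) with h'' | h''
              · exact Or.inl h''
              · exact Or.inr ⟨h''.symm ▸ rfl, hbj⟩
            by_cases hrb : List.foldl (fun b j => if b == -1 || decide (g j < g b) then j else b) b M' = b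
            · rw [hrb]; exact hbx
            · exact pvLex_trans (hmin b List.mem_cons_self (fun h => hrb h.symm)) hbx
          · exact hmin x (List.mem_cons_of_mem _ h') hne

lemma pvHead_dropWhile {α : Type} (p : α → Bool) (l : List α) (hd : α) (t : List α)
    (h : l.dropWhile p = hd :: t) : p hd = false := by
  induction l with
  | nil => cases h
  | cons a l ih =>
    rw [List.dropWhile_cons] at h
    by_cases hp : p a
    · rw [if_pos hp] at h; exact ih h
    · rw [if_neg hp] at h
      cases h
      simpa using hp

lemma pvFoldl_filter (L : List Int) (q : Int → Bool) (r : Int → Int → Bool) :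
    ∀ b : Int, L.foldl (fun b j => if q j && r b j then j else b) b
      = (L.filter q).foldl (fun b j => if r b j then j else b) b := by
  induction L with
  | nil => intro b; rfl
  | cons a L ih =>
    intro b
    rw [List.foldl_cons, List.filter_cons]
    by_cases hq : q a
    · simp only [hq, Bool.true_and, if_true, List.foldl_cons]
      exact ih _
    · simp only [hq, Bool.false_and, Bool.false_eq_true, if_false]
      exact ih b

lemma pvF_best (g : Int → Int) (n : Nat) (s : List Int) (k : Nat) (hk : k < n)
    (hperm : s.Perm (PySem.List.pyRange 0 n 1))
    (hsort : s.Pairwise (pvLex g)) :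
    (pvF s k).getD 0 = pvBest g n k := by
  have hnd : s.Nodup := hperm.nodup_iff.mpr (PySem.List.nodup_pyRange_one 0 n)
  have hmem : ∀ x : Int, x ∈ s ↔ (0 ≤ x ∧ x < n) := by
    intro x
    rw [hperm.mem_iff, PySem.List.mem_pyRange_one]
  have hkmem : (k : Int) ∈ s := (hmem _).mpr ⟨Int.natCast_nonneg k, by exact_mod_cast hk⟩
  -- split s at the occurrence of k
  set p : Int → Bool := fun x => !decide (x = (k : Int)) with hp
  have hune : s.dropWhile p ≠ [] := by
    intro h
    have := List.dropWhile_eq_nil_iff.mp h _ hkmem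
    simp [hp] at this
  obtain ⟨hd, t, hu⟩ := List.exists_cons_of_ne_nil hune
  have hhd : hd = (k : Int) := by
    have := pvHead_dropWhile p s hd t hu
    simpa [hp] using this
  subst hhd
  have hsplit : s = s.takeWhile p ++ (k : Int) :: t := by
    rw [← hu, List.takeWhile_append_dropWhile]
  set pre := s.takeWhile p with hpre
  have hpw := hsplit ▸ hsort
  rw [List.pairwise_append] at hpw
  obtain ⟨hpre_pw, hkt_pw, hcross⟩ := hpw
  have htk : ∀ x ∈ t, pvLex g (k : Int) x := (List.pairwise_cons.mp hkt_pw).1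
  have htpw : t.Pairwise (pvLex g) := (List.pairwise_cons.mp hkt_pw).2
  -- the two candidate lists
  set T := t.filter (fun x => decide ((k : Int) < x)) with hT
  set M := (PySem.List.pyRange ((k : Int) + 1) n 1).filter (fun j => decide (g k ≤ g j)) with hM
  have hTmem : ∀ x, x ∈ T ↔ (x ∈ t ∧ (k : Int) < x) := by intro x; simp [hT]
  have hMmem : ∀ x, x ∈ M ↔ ((k : Int) < x ∧ x < n ∧ g k ≤ g x) := by
    intro x
    simp only [hM, List.mem_filter, PySem.List.mem_pyRange_one, decide_eq_true_eq]
    constructor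
    · rintro ⟨⟨h1, h2⟩, h3⟩; exact ⟨by omega, h2, h3⟩
    · rintro ⟨h1, h2, h3⟩; exact ⟨⟨by omega, h2⟩, h3⟩
  have hTM : ∀ x, x ∈ T ↔ x ∈ M := by
    intro x
    rw [hTmem, hMmem]
    constructor
    · rintro ⟨hxt, hkx⟩
      have hxs : x ∈ s := by rw [hsplit]; exact List.mem_append_right _ (List.mem_cons_of_mem _ hxt)
      have hxb := (hmem x).mp hxs
      refine ⟨hkx, hxb.2, ?_⟩
      rcases htk x hxt with h | ⟨h, _⟩
      · exact le_of_lt h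
      · exact le_of_eq h
    · rintro ⟨hkx, hxn, hgk⟩
      have hxs : x ∈ s := (hmem x).mpr ⟨by omega, hxn⟩
      have hlex : pvLex g (k : Int) x := by
        rcases lt_or_eq_of_le hgk with h | h
        · exact Or.inl h
        · exact Or.inr ⟨h, hkx⟩
      have hxt : x ∈ t := by
        rw [hsplit] at hxs
        rcases List.mem_append.mp hxs with h | h
        · exact absurd (hcross x h (k : Int) List.mem_cons_self) (fun hc => pvLex_asymm hc hlex)
        · rcases List.mem_cons.mp h with h' | h'
          · omega
          · exact h'
      exact ⟨hxt, hkx⟩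
  -- left side: pvF s k is the head of T
  have hFT : pvF s (k : Int) = T.head? := by
    rw [pvF, hu, List.tail_cons, hT, List.head?_filter]
  -- right side: pvBest's fold, with the ok-test pulled into a filter
  have hfold : (PySem.List.pyRange ((k : Int) + 1) n 1).foldl
      (fun b j => if decide (g k ≤ g j) && (b == -1 || decide (g j < g b)) then j else b) (-1)
      = M.foldl (fun b j => if b == -1 || decide (g j < g b) then j else b) (-1) := by
    rw [hM]
    exact pvFoldl_filter (PySem.List.pyRange ((k : Int) + 1) n 1) _ _ (-1)
  have hMpw : M.Pairwise (· < ·) := (PySem.List.pairwise_lt_pyRange_one _ _).filter _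
  have hTpw : T.Pairwise (pvLex g) := htpw.filter _
  rw [hFT]
  cases hTc : T with
  | nil =>
    have hMnil : M = [] := by
      rw [List.eq_nil_iff_forall_not_mem]
      intro x hx
      have := (hTM x).mpr hx
      rw [hTc] at this
      cases this
    rw [pvBest, hfold, hMnil]
    rfl
  | cons m T' =>
    have hmT : m ∈ T := by rw [hTc]; exact List.mem_cons_self
    have hmM : m ∈ M := (hTM m).mp hmT
    have hMne : M ≠ [] := fun h => by rw [h] at hmM; cases hmM
    obtain ⟨j0, M1, hMc⟩ := List.exists_cons_of_ne_nil hMne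
    have hj0 : (k : Int) < j0 := ((hMmem j0).mp (hMc ▸ List.mem_cons_self)).1
    have hstart : M.foldl (fun b j => if b == -1 || decide (g j < g b) then j else b) (-1)
        = M1.foldl (fun b j => if b == -1 || decide (g j < g b) then j else b) j0 := by
      rw [hMc]; simp
    rcases List.pairwise_cons.mp (hMc ▸ hMpw) with ⟨hj0M1, hM1pw⟩
    obtain ⟨hrmem, hrmin⟩ := pvFold_pick g M1 j0 hM1pw (by omega) hj0M1
    set r := M1.foldl (fun b j => if b == -1 || decide (g j < g b) then j else b) j0 with hr
    have hrM : r ∈ M := by rw [hMc]; exact hrmem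
    have hrm : r = m := by
      by_contra hne
      have h1 : pvLex g r m := by
        rw [hMc] at hmM
        exact hrmin m hmM (fun h => hne h.symm)
      have hrT : r ∈ T := (hTM r).mpr hrM
      rw [hTc] at hrT
      rcases List.mem_cons.mp hrT with h | h
      · exact hne h
      · exact pvLex_asymm h1 ((List.pairwise_cons.mp (hTc ▸ hTpw)).1 r h)
    have hrk : (k : Int) < r := ((hMmem r).mp hrM).1
    rw [pvBest, hfold, hstart, hrm]
    simp only [List.head?_cons, Option.getD_some]
    rw [if_pos (by simp; omega)]
    

theorem pvMaster (g : Int → Int) (n : Nat) :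
    (pvPass ((PySem.List.sorted ((PySem.List.pyRange 0 n 1).map (fun j => (g j, j)))
        (fun p => toLex p)).map Prod.snd) (List.replicate n (0 : Int), [])).1
      = (PySem.List.pyRange 0 n 1).map (pvBest g n) := by
  set P := (PySem.List.pyRange 0 (n : Int) 1).map (fun j => (g j, j)) with hPdef
  set s1 := PySem.List.sorted P (fun p => toLex p) with hs1def
  set s := s1.map Prod.snd with hsdef
  have hperm1 : s1.Perm P := PySem.List.sorted_perm P _ _
  have hP2 : P.map Prod.snd = PySem.List.pyRange 0 (n : Int) 1 := by
    rw [hPdef, List.map_map]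
    exact List.map_id _
  have hsperm : s.Perm (PySem.List.pyRange 0 (n : Int) 1) := by
    rw [hsdef, ← hP2]
    exact hperm1.map Prod.snd
  have hs1mem : ∀ q ∈ s1, q = (g q.2, q.2) := by
    intro q hq
    rcases List.mem_map.mp (hperm1.mem_iff.mp hq) with ⟨j, _, hj⟩
    rw [← hj]
  have hPnd : P.Nodup := by
    refine (PySem.List.nodup_pyRange_one 0 (n : Int)).map ?_
    intro a b hab
    exact congrArg Prod.snd hab
  have hs1nd : s1.Nodup := hperm1.nodup_iff.mpr hPnd
  have hs1pw_le : s1.Pairwise (fun a b => toLex a ≤ toLex b) :=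
    PySem.List.sorted_pairwise P (fun p => toLex p)
  have hs1pw_lt : s1.Pairwise (fun a b => toLex a < toLex b) := by
    refine (hs1pw_le.and hs1nd).imp ?_
    rintro a b ⟨hle, hne⟩
    exact lt_of_le_of_ne hle (fun h => hne (toLex.injective h))
  have hspw : s.Pairwise (pvLex g) := by
    rw [hsdef, List.pairwise_map]
    refine hs1pw_lt.imp_of_mem ?_
    intro a b ha hb hlt
    rw [hs1mem a ha, hs1mem b hb] at hlt
    rcases Prod.Lex.lt_iff.mp hlt with h | ⟨h1, h2⟩
    · exact Or.inl h
    · exact Or.inr ⟨h1, h2⟩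
  have hsmem : ∀ x : Int, x ∈ s ↔ (0 ≤ x ∧ x < n) := by
    intro x
    rw [hsperm.mem_iff, PySem.List.mem_pyRange_one]
  have hsnd : s.Nodup := hsperm.nodup_iff.mpr (PySem.List.nodup_pyRange_one 0 n)
  have hbl : ∀ x ∈ s, 0 ≤ x ∧ x.toNat < (List.replicate n (0 : Int)).length := by
    intro x hx
    have := (hsmem x).mp hx
    rw [List.length_replicate]
    omega
  obtain ⟨hlen, hchar⟩ := pvPass_char s (List.replicate n (0 : Int)) []
    List.Pairwise.nil (by intro x hx; cases hx) hsnd (by intro x hx; cases hx) hbl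
  apply List.ext_getElem?
  intro k
  by_cases hkn : k < n
  · have hkr : k < (List.replicate n (0 : Int)).length := by simpa using hkn
    rw [hchar k hkr]
    have hks : (k : Int) ∈ s := (hsmem _).mpr ⟨Int.natCast_nonneg k, by exact_mod_cast hkn⟩
    rw [if_neg (by intro h; cases h), if_pos hks]
    have hgd : (List.replicate n (0 : Int)).getD k 0 = 0 := by
      rw [List.getD_eq_getElem?_getD, List.getElem?_replicate, if_pos hkn]
      rfl
    rw [hgd, pvF_best g n s k hkn hsperm hspw]
    rw [PySem.List.getElem?_map_pyRange_zero _ _ _ hkn]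
  · have h1 : (pvPass s (List.replicate n (0 : Int), [])).1[k]? = none := by
      rw [List.getElem?_eq_none]
      rw [hlen, List.length_replicate]
      omega
    have h2 : ((PySem.List.pyRange 0 (n : Int) 1).map (pvBest g n))[k]? = none := by
      rw [List.getElem?_eq_none]
      rw [List.length_map]
      have := PySem.List.length_pyRange_one (0 : Int) n
      omega
    rw [h1, h2]

-- ===== VERDICT (by name: the statement is the Claim_ definition above) =====
theorem logSetup_spec : Claim_equal_logSetup := by
  intro jumps _
  show logSetup jumps = logSetup_alt jumps
  have henum : (PySem.List.enumerate jumps)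
      = (PySem.List.pyRange 0 (jumps.length : Int) 1).map
          (fun j => (j, PySem.List.pyGetD jumps j 0)) :=
    PySem.List.enumerate_eq_map_pyRange jumps 0
  have hrun : ∀ g : Int → Int,
      ((PySem.List.sorted ((PySem.List.pyRange 0 (jumps.length : Int) 1).map (fun j => (g j, j)))
          (fun p => toLex p)).foldl (fun st p => pvStep st p.2)
        (List.replicate jumps.length (0 : Int), ([] : List Int))).1
      = (PySem.List.pyRange 0 (jumps.length : Int) 1).map (pvBest g jumps.length) := by
    intro g
    rw [← List.foldl_map (f := Prod.snd) (g := pvStep)]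
    exact pvMaster g jumps.length
  have hA1 : ((PySem.List.enumerate jumps).map (fun p => (p.2, p.1)))
      = (PySem.List.pyRange 0 (jumps.length : Int) 1).map
          (fun j => (PySem.List.pyGetD jumps j 0, j)) := by
    rw [henum, List.map_map]
    rfl
  have hA2 : ((PySem.List.enumerate jumps).map (fun p => (-p.2, p.1)))
      = (PySem.List.pyRange 0 (jumps.length : Int) 1).map
          (fun j => (-(PySem.List.pyGetD jumps j 0), j)) := by
    rw [henum, List.map_map]
    rfl
  show (_, _) = (_, _)
  refine Prod.ext ?_ ?_
  · -- next_higher component, value map g j = jumps[j]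
    show ((PySem.List.sorted ((PySem.List.enumerate jumps).map (fun p => (p.2, p.1)))
        (fun p => toLex p)).foldl (fun st p => pvStep st p.2)
        (List.replicate jumps.length (0 : Int), ([] : List Int))).1 = _
    rw [hA1, hrun (fun x => PySem.List.pyGetD jumps x 0)]
    apply List.map_congr_left
    intro i _
    rfl
  · -- next_lower component, value map g j = -jumps[j]
    show ((PySem.List.sorted ((PySem.List.enumerate jumps).map (fun p => (-p.2, p.1)))
        (fun p => toLex p)).foldl (fun st p => pvStep st p.2)
        (List.replicate jumps.length (0 : Int), ([] : List Int))).1 = _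
    rw [hA2, hrun (fun x => -(PySem.List.pyGetD jumps x 0))]
    apply List.map_congr_left
    intro i _
    show pvBest (fun x => -(PySem.List.pyGetD jumps x 0)) jumps.length i = _
    rw [pvBest]
    have hfun : (fun (b j : Int) =>
        if decide (-(PySem.List.pyGetD jumps i 0) ≤ -(PySem.List.pyGetD jumps j 0)) &&
            (b == -1 || decide (-(PySem.List.pyGetD jumps j 0) < -(PySem.List.pyGetD jumps b 0)))
        then j else b)
        = (fun (b j : Int) =>
          if decide (PySem.List.pyGetD jumps j 0 ≤ PySem.List.pyGetD jumps i 0) &&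
              (b == -1 || decide (PySem.List.pyGetD jumps b 0 < PySem.List.pyGetD jumps j 0))
          then j else b) := by
      funext b j
      have e1 : decide (-(PySem.List.pyGetD jumps i 0) ≤ -(PySem.List.pyGetD jumps j 0))
          = decide (PySem.List.pyGetD jumps j 0 ≤ PySem.List.pyGetD jumps i 0) :=
        decide_eq_decide.mpr (by omega)
      have e2 : decide (-(PySem.List.pyGetD jumps j 0) < -(PySem.List.pyGetD jumps b 0))
          = decide (PySem.List.pyGetD jumps b 0 < PySem.List.pyGetD jumps j 0) :=
        decide_eq_decide.mpr (by omega)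
      rw [e1, e2]
    rw [hfun]
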